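-- pv_equiv track=rewrite | github.com/jhnlynn/playstation | portfolioBalances/portfolioBalances.py | portfolio_balances
-- ===== SOURCE A (Python) =====
-- from typing import List
--
-- def portfolio_balances(n: int, rounds: List[List[int]]) -> int:
--     """
--
--
--     :param n: 3
--     :param rounds: [[1, 2, 10], [2, 4, 5], [3, 5, 12]]
--     :return:
--     """
--     invest = [0 for _ in range(n)]
--     for round in rounds:
--         invest[round[0] - 1] += round[2]
--         if round[1] < n:
--             invest[round[1]] -= round[2]
--
--     cur = 0
--     max_val = 0
--     for val in invest:
--         cur += val
--         max_val = max(max_val, cur)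
--     return max_val
-- ===== SOURCE B (Python) =====
-- from typing import List
--
-- def _best_prefix(xs: List[int]) -> int:
--     # largest prefix sum of xs (the empty prefix counts as 0), by divide and conquer
--     if not xs:
--         return 0
--     if len(xs) == 1:
--         return max(0, xs[0])
--     mid = len(xs) // 2
--     return max(_best_prefix(xs[:mid]), sum(xs[:mid]) + _best_prefix(xs[mid:]))
--
-- def portfolio_balances(n: int, rounds: List[List[int]]) -> int:
--     diff = [0] * n
--     for r in rounds:
--         diff[r[0] - 1] += r[2]
--     for r in rounds:
--         if r[1] < n:
--             diff[r[1]] -= r[2]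
--     return _best_prefix(diff)
-- ===== Notes on version B (the rewrite author's own statement) =====
-- stated objective: alternative
-- what changed: B records all additions in one pass over the rounds and all subtractions in a second pass (instead of interleaving them per round), and computes the maximal prefix balance by divide and conquer on the delta array instead of a running prefix-sum/max scan.
import Mathlib
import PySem

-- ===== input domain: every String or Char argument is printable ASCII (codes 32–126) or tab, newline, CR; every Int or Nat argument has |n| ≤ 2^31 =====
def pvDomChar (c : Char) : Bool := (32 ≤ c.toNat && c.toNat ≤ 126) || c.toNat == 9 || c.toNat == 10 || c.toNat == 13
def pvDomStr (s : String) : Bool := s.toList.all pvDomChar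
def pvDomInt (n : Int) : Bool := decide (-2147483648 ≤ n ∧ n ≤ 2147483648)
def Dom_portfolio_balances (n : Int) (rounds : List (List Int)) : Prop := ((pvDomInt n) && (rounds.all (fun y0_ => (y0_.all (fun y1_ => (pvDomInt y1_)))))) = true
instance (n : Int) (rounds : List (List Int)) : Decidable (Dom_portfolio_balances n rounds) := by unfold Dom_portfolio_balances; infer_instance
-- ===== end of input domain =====

-- B applies all additions in one pass over the rounds and all subtractions in a second pass,
-- and computes the maximal prefix balance by divide and conquer instead of a running scan
-- ('alternative'; not faster).

-- ===== PORT A =====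
-- first update of A's loop body: invest[round[0] - 1] += round[2]
def pvAStep1 (inv : List Int) (r : List Int) : List Int :=
  PySem.List.pySetD inv (PySem.List.pyGetD r 0 0 - 1)
    (PySem.List.pyGetD inv (PySem.List.pyGetD r 0 0 - 1) 0 + PySem.List.pyGetD r 2 0)

-- whole body of A's 'for round in rounds' loop
def pvAStep (n : Int) (inv : List Int) (r : List Int) : List Int :=
  if PySem.List.pyGetD r 1 0 < n then
    PySem.List.pySetD (pvAStep1 inv r) (PySem.List.pyGetD r 1 0)
      (PySem.List.pyGetD (pvAStep1 inv r) (PySem.List.pyGetD r 1 0) 0 - PySem.List.pyGetD r 2 0)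
  else pvAStep1 inv r

def portfolio_balances (n : Int) (rounds : List (List Int)) : Int :=
  let invest0 := (PySem.List.pyRange 0 n 1).map (fun _ => (0 : Int))
  let invest := rounds.foldl (pvAStep n) invest0
  (invest.foldl (fun (p : Int × Int) v => (p.1 + v, max p.2 (p.1 + v))) ((0 : Int), (0 : Int))).2

-- ===== PORT B =====
-- body of B's first pass: diff[r[0] - 1] += r[2]
def pvBAdd (inv : List Int) (r : List Int) : List Int :=
  PySem.List.pySetD inv (PySem.List.pyGetD r 0 0 - 1)
    (PySem.List.pyGetD inv (PySem.List.pyGetD r 0 0 - 1) 0 + PySem.List.pyGetD r 2 0)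

-- body of B's second pass: if r[1] < n: diff[r[1]] -= r[2]
def pvBSub (n : Int) (inv : List Int) (r : List Int) : List Int :=
  if PySem.List.pyGetD r 1 0 < n then
    PySem.List.pySetD inv (PySem.List.pyGetD r 1 0)
      (PySem.List.pyGetD inv (PySem.List.pyGetD r 1 0) 0 - PySem.List.pyGetD r 2 0)
  else inv

-- len(xs) // 2 on a natural length (cited by pvBestPrefix's termination proof)
lemma pvFloordivTwo (L : Nat) : PySem.Int.floordiv (L : Int) 2 = ((L / 2 : Nat) : Int) := by
  unfold PySem.Int.floordiv
  rw [Int.fdiv_eq_ediv_of_nonneg _ (by norm_num)]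
  omega

-- _best_prefix: largest prefix sum (empty prefix counts as 0), by divide and conquer
def pvBestPrefix (xs : List Int) : Int :=
  if _h0 : xs = [] then 0
  else if _h1 : xs.length = 1 then max 0 (PySem.List.pyGetD xs 0 0)
  else
    let mid := PySem.Int.floordiv (PySem.List.len xs) 2
    max (pvBestPrefix (PySem.List.slice xs none (some mid)))
      ((PySem.List.slice xs none (some mid)).sum + pvBestPrefix (PySem.List.slice xs (some mid) none))
termination_by xs.length
decreasing_by
  · rw [PySem.List.len_eq, pvFloordivTwo, PySem.List.slice_to_natCast]
    have hne : xs.length ≠ 0 := by simpa using _h0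
    simp only [List.length_take]
    omega
  · rw [PySem.List.len_eq, pvFloordivTwo, PySem.List.slice_from_natCast]
    have hne : xs.length ≠ 0 := by simpa using _h0
    simp only [List.length_drop]
    omega

def portfolio_balances_alt (n : Int) (rounds : List (List Int)) : Int :=
  let diff0 := List.replicate n.toNat (0 : Int)
  let diff1 := rounds.foldl pvBAdd diff0
  let diff := rounds.foldl (pvBSub n) diff1
  pvBestPrefix diff

-- ===== PRECONDITION & SPEC =====
-- Pre_ is exactly the domain on which A returns: every round has at least 3 entries, its start index
-- round[0]-1 is a valid Python index of the length-n array, and so is round[1] whenever round[1] < n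
-- (otherwise A raises IndexError).
def Pre_portfolio_balances (n : Int) (rounds : List (List Int)) : Prop :=
  ∀ r ∈ rounds, 3 ≤ r.length ∧
    PySem.Raise.InRange n.toNat (PySem.List.pyGetD r 0 0 - 1) ∧
    (PySem.List.pyGetD r 1 0 < n → PySem.Raise.InRange n.toNat (PySem.List.pyGetD r 1 0))
instance (n : Int) (rounds : List (List Int)) : Decidable (Pre_portfolio_balances n rounds) := by
  unfold Pre_portfolio_balances; infer_instance

def pvWitness_portfolio_balances : Int × List (List Int) := (3, [[1, 2, 10], [2, 4, 5], [3, 5, 12]])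

def Spec_portfolio_balances (n : Int) (rounds : List (List Int)) (out : Int) : Prop := out = portfolio_balances_alt n rounds
instance (n : Int) (rounds : List (List Int)) (out : Int) : Decidable (Spec_portfolio_balances n rounds out) := by unfold Spec_portfolio_balances; infer_instance

-- ===== CLAIM (what is proved, stated in full; the proofs are below) =====
def Claim_equal_portfolio_balances : Prop := ∀ (n : Int) (rounds : List (List Int)), Dom_portfolio_balances n rounds → Pre_portfolio_balances n rounds → Spec_portfolio_balances n rounds (portfolio_balances n rounds)

-- ===== LEMMAS AND PROOFS =====

-- a single signed in-place update, the common shape of both loop bodies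
def pvUpd (xs : List Int) (i δ : Int) : List Int :=
  PySem.List.pySetD xs i (PySem.List.pyGetD xs i 0 + δ)

lemma pvIdx_lt (nn : Nat) (i : Int) (J : Nat) (h : PySem.List.pyIdx? nn i = some J) : J < nn := by
  unfold PySem.List.pyIdx? at h
  split_ifs at h <;> simp_all <;> omega

lemma pvUpd_eq (xs : List Int) (i δ : Int) :
    pvUpd xs i δ = match PySem.List.pyIdx? xs.length i with
      | some J => xs.set J (xs.getD J 0 + δ)
      | none => xs := by
  unfold pvUpd PySem.List.pySetD PySem.List.pySet? PySem.List.pyGetD PySem.List.pyGet?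
  cases h : PySem.List.pyIdx? xs.length i <;> simp [List.getD_eq_getElem?_getD]

lemma pvUpd_length (xs : List Int) (i δ : Int) : (pvUpd xs i δ).length = xs.length := by
  unfold pvUpd
  simp [PySem.List.length_pySetD]

-- two in-place signed updates commute
lemma pvUpd_comm (xs : List Int) (i j δ ε : Int) :
    pvUpd (pvUpd xs i δ) j ε = pvUpd (pvUpd xs j ε) i δ := by
  cases hi : PySem.List.pyIdx? xs.length i with
  | none =>
    have e1 : pvUpd xs i δ = xs := by rw [pvUpd_eq, hi]
    have e2 : pvUpd (pvUpd xs j ε) i δ = pvUpd xs j ε := by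
      rw [pvUpd_eq, pvUpd_length, hi]
    rw [e1, e2]
  | some J =>
    cases hj : PySem.List.pyIdx? xs.length j with
    | none =>
      have e1 : pvUpd xs j ε = xs := by rw [pvUpd_eq, hj]
      have e2 : pvUpd (pvUpd xs i δ) j ε = pvUpd xs i δ := by
        rw [pvUpd_eq, pvUpd_length, hj]
      rw [e1, e2]
    | some K =>
      have hJ : J < xs.length := pvIdx_lt _ _ _ hi
      have hK : K < xs.length := pvIdx_lt _ _ _ hj
      have ei : pvUpd xs i δ = xs.set J (xs.getD J 0 + δ) := by rw [pvUpd_eq, hi]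
      have ej : pvUpd xs j ε = xs.set K (xs.getD K 0 + ε) := by rw [pvUpd_eq, hj]
      have oj : PySem.List.pyIdx? (xs.set J (xs.getD J 0 + δ)).length j = some K := by
        rw [List.length_set]; exact hj
      have oi : PySem.List.pyIdx? (xs.set K (xs.getD K 0 + ε)).length i = some J := by
        rw [List.length_set]; exact hi
      rw [ei, ej, pvUpd_eq, pvUpd_eq]
      simp only [oi, oj]
      by_cases hJK : J = K
      · subst hJK
        have hg : ∀ v : Int, (xs.set J v).getD J 0 = v := by
          intro v
          simp [List.getD_eq_getElem?_getD, hJ]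
        rw [hg, hg, List.set_set, List.set_set]
        ring_nf
      · have hg1 : (xs.set J (xs.getD J 0 + δ)).getD K 0 = xs.getD K 0 := by
          simp [List.getD_eq_getElem?_getD, hJK]
        have hg2 : (xs.set K (xs.getD K 0 + ε)).getD J 0 = xs.getD J 0 := by
          simp [List.getD_eq_getElem?_getD, Ne.symm hJK]
        rw [hg1, hg2, List.set_comm _ _ hJK]

-- the loop bodies are single signed updates
lemma pvBAdd_upd (inv r : List Int) :
    pvBAdd inv r = pvUpd inv (PySem.List.pyGetD r 0 0 - 1) (PySem.List.pyGetD r 2 0) := rfl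

lemma pvBSub_upd (n : Int) (inv r : List Int) :
    pvBSub n inv r = if PySem.List.pyGetD r 1 0 < n then
      pvUpd inv (PySem.List.pyGetD r 1 0) (-(PySem.List.pyGetD r 2 0)) else inv := by
  unfold pvBSub pvUpd
  split_ifs with h
  · rw [sub_eq_add_neg]
  · rfl

-- an addition commutes past a (guarded) subtraction
lemma pvAddSub_comm (n : Int) (a : List Int) (x y : List Int) :
    pvBAdd (pvBSub n a y) x = pvBSub n (pvBAdd a x) y := by
  rw [pvBAdd_upd, pvBAdd_upd, pvBSub_upd, pvBSub_upd]
  split_ifs with h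
  · exact pvUpd_comm a _ _ _ _
  · rfl

-- a g-step commutes past a whole f-fold
lemma pvFoldl_g_past_f {α β : Type} (f g : α → β → α)
    (comm : ∀ a x y, f (g a y) x = g (f a x) y) (t : List β) (a : α) (y : β) :
    t.foldl f (g a y) = g (t.foldl f a) y := by
  induction t generalizing a with
  | nil => rfl
  | cons x s ih => simp only [List.foldl_cons, comm, ih]

-- interleaved per-element f-then-g equals all f's then all g's
lemma pvFoldl_interchange {α β : Type} (f g : α → β → α)
    (comm : ∀ a x y, f (g a y) x = g (f a x) y) (rs : List β) (a : α) :
    rs.foldl (fun a r => g (f a r) r) a = rs.foldl g (rs.foldl f a) := by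
  induction rs generalizing a with
  | nil => rfl
  | cons r t ih =>
    simp only [List.foldl_cons]
    rw [ih, pvFoldl_g_past_f f g comm t (f a r) r]

-- maximal prefix sum (empty prefix included), the common specification of both second phases
def pvMP : List Int → Int
  | [] => 0
  | x :: t => max 0 (x + pvMP t)

lemma pvMP_nonneg (xs : List Int) : 0 ≤ pvMP xs := by
  cases xs <;> simp [pvMP]

lemma pvMP_append (L R : List Int) : pvMP (L ++ R) = max (pvMP L) (L.sum + pvMP R) := by
  induction L with
  | nil =>
    have := pvMP_nonneg R
    simp [pvMP]
    omega
  | cons x t ih =>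
    simp only [List.cons_append, pvMP, ih, List.sum_cons]
    omega

-- A's running (cur, max) fold computes the maximal prefix sum
lemma pvFoldA_mp (xs : List Int) (c m : Int) (h : c ≤ m) :
    (xs.foldl (fun (p : Int × Int) v => (p.1 + v, max p.2 (p.1 + v))) (c, m)).2
      = max m (c + pvMP xs) := by
  induction xs generalizing c m with
  | nil => simp [pvMP]; omega
  | cons x t ih =>
    simp only [List.foldl_cons, pvMP]
    rw [ih (c + x) (max m (c + x)) (le_max_right _ _)]
    have := pvMP_nonneg t
    omega

-- B's divide and conquer computes the maximal prefix sum
lemma pvBest_mp : ∀ (k : Nat) (xs : List Int), xs.length ≤ k → pvBestPrefix xs = pvMP xs := by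
  intro k
  induction k with
  | zero =>
    intro xs h
    have hx : xs = [] := by cases xs <;> simp_all
    rw [hx, pvBestPrefix]
    simp [pvMP]
  | succ k ih =>
    intro xs h
    rcases xs with _ | ⟨x, t⟩
    · rw [pvBestPrefix]; simp [pvMP]
    rcases t with _ | ⟨y, u⟩
    · rw [pvBestPrefix]
      simp [pvMP, PySem.List.pyGetD_zero_cons]
    · rw [pvBestPrefix]
      have hne : (x :: y :: u) ≠ ([] : List Int) := by simp
      have hl1 : (x :: y :: u).length ≠ 1 := by simp
      rw [dif_neg hne, dif_neg hl1]
      simp only [PySem.List.len_eq, pvFloordivTwo, PySem.List.slice_to_natCast,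
        PySem.List.slice_from_natCast]
      have hlen : (x :: y :: u).length = u.length + 2 := by simp
      rw [ih _ (by simp only [List.length_take]; omega),
        ih _ (by simp only [List.length_drop]; omega)]
      conv_rhs => rw [← List.take_append_drop ((x :: y :: u).length / 2) (x :: y :: u)]
      rw [pvMP_append]

-- A's initial array equals B's
lemma pvInvest0 (n : Int) : (PySem.List.pyRange 0 n 1).map (fun _ => (0 : Int)) = List.replicate n.toNat 0 := by
  rw [PySem.List.pyRange_one]
  refine List.eq_replicate_iff.mpr ⟨by simp, ?_⟩
  intro b hb
  simp only [List.mem_map] at hb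
  obtain ⟨_, _, h⟩ := hb
  exact h.symm

-- ===== VERDICT (by name: the statement is the Claim_ definition above) =====
theorem portfolio_balances_spec : Claim_equal_portfolio_balances := by
  intro n rounds _hdom _hpre
  unfold Spec_portfolio_balances
  have hstep : pvAStep n = fun inv r => pvBSub n (pvBAdd inv r) r := rfl
  simp only [portfolio_balances, portfolio_balances_alt]
  rw [pvInvest0, hstep, pvFoldl_interchange pvBAdd (pvBSub n) (pvAddSub_comm n) rounds]
  set diff := rounds.foldl (pvBSub n) (rounds.foldl pvBAdd (List.replicate n.toNat 0)) with hdiff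
  rw [pvFoldA_mp diff 0 0 le_rfl, pvBest_mp diff.length diff le_rfl]
  have := pvMP_nonneg diff
  omega
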